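-- pv_equiv track=rewrite | github.com/Qenszu/workshop | python/WDI/zestaw_3/109.py | sum_column
-- ===== SOURCE A (Python) =====
-- def sum_column(T, c):
--     size = len(T)
--     maxi = 0
--
--     for i in range(size):
--         sume = 0
--         for j in range(10):
--             if i+j == size:
--                 break
--
--             sume += T[i+j][c]
--         #end for
--         maxi = max(maxi, sume)
--     #end for
--
--     return maxi
-- ===== SOURCE B (Python) =====
-- def sum_column(T, c):
--     n = len(T)
--     pre = [0]
--     for row in T:
--         pre.append(pre[-1] + row[c])
--     best = 0
--     for i in range(n):
--         s = pre[min(i + 10, n)] - pre[i]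
--         if s > best:
--             best = s
--     return best
-- ===== Notes on version B (the rewrite author's own statement) =====
-- stated objective: faster
-- what changed: Replaces the nested bounded-window re-summation with a single prefix-sum pass followed by one constant-time windowed lookup per start index.
import Mathlib
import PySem

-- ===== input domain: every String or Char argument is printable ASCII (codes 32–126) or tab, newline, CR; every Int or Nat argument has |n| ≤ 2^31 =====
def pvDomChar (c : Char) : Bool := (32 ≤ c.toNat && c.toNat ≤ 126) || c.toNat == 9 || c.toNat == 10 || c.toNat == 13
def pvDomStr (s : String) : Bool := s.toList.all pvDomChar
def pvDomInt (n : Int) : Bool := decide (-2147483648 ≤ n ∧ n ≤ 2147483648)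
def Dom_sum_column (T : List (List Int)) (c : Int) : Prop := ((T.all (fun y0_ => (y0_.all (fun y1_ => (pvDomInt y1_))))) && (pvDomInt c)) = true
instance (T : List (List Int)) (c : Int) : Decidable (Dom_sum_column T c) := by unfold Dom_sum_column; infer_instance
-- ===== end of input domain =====

-- B replaces A's nested bounded-window re-summation by one prefix-sum pass plus a
-- constant-time windowed lookup per start index (fewer column accesses per row).

-- ===== PORT A =====
-- inner 'for j in range(10)' with its break, carried as recursion over the j-list
def pvAInner (T : List (List Int)) (c size i : Int) : List Int → Int → Int
  | [], sume => sume
  | j :: rest, sume =>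
    if i + j = size then sume
    else pvAInner T c size i rest
      (sume + PySem.List.pyGetD (PySem.List.pyGetD T (i + j) []) c 0)

def sum_column (T : List (List Int)) (c : Int) : Int :=
  let size : Int := PySem.List.len T
  (PySem.List.pyRange 0 size 1).foldl
    (fun maxi i => max maxi (pvAInner T c size i (PySem.List.pyRange 0 10 1) 0)) 0

-- ===== PORT B =====
-- 'for row in T: pre.append(pre[-1] + row[c])'
def pvBPre (c : Int) : List (List Int) → List Int → List Int
  | [], pre => pre
  | row :: rest, pre =>
    pvBPre c rest (pre ++ [PySem.List.pyGetD pre (-1) 0 + PySem.List.pyGetD row c 0])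

def sum_column_alt (T : List (List Int)) (c : Int) : Int :=
  let n : Int := PySem.List.len T
  let pre := pvBPre c T [0]
  (PySem.List.pyRange 0 n 1).foldl
    (fun best i =>
      let s := PySem.List.pyGetD pre (min (i + 10) n) 0 - PySem.List.pyGetD pre i 0
      if s > best then s else best) 0

-- ===== PRECONDITION & SPEC =====
-- Python A indexes every row at c, so it raises IndexError unless c is a valid
-- (possibly negative) index into each row; Pre_ admits exactly the inputs where A returns.
def Pre_sum_column (T : List (List Int)) (c : Int) : Prop :=
  ∀ row ∈ T, PySem.Raise.InRange row.length c

instance (T : List (List Int)) (c : Int) : Decidable (Pre_sum_column T c) := by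
  unfold Pre_sum_column; infer_instance

def pvWitness_sum_column : List (List Int) × Int := ([[1, -2], [3, 4], [5, -6]], 1)

def Spec_sum_column (T : List (List Int)) (c : Int) (out : Int) : Prop := out = sum_column_alt T c
instance (T : List (List Int)) (c : Int) (out : Int) : Decidable (Spec_sum_column T c out) := by unfold Spec_sum_column; infer_instance

-- ===== CLAIM (what is proved, stated in full; the proofs are below) =====
def Claim_equal_sum_column : Prop := ∀ (T : List (List Int)) (c : Int), Dom_sum_column T c → Pre_sum_column T c → Spec_sum_column T c (sum_column T c)

-- ===== LEMMAS AND PROOFS =====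

-- running partial sums starting strictly after seed s
def pvPS (s : Int) : List Int → List Int
  | [] => []
  | x :: xs => (s + x) :: pvPS (s + x) xs

theorem pvPS_length (s : Int) (l : List Int) : (pvPS s l).length = l.length := by
  induction l generalizing s with
  | nil => rfl
  | cons x xs ih => simp [pvPS, ih]

theorem pvPS_getD (l : List Int) (s : Int) (k : Nat) (hk : k ≤ l.length) :
    ((s :: pvPS s l).getD k 0) = s + (l.take k).sum := by
  induction l generalizing s k with
  | nil =>
    have hk0 : k = 0 := by simpa using hk
    subst hk0
    simp
  | cons x xs ih =>
    cases k with
    | zero => simp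
    | succ k' =>
      have hk' : k' ≤ xs.length := by simpa using hk
      have := ih (s + x) k' hk'
      simp only [pvPS, List.getD_cons_succ, List.take_succ_cons, List.sum_cons] at *
      rw [this]; ring

theorem pvBPre_eq (c : Int) (rows : List (List Int)) (pre0 : List Int) (h : pre0 ≠ []) :
    pvBPre c rows pre0 = pre0 ++ pvPS (pre0.getLast h) (rows.map (fun row => PySem.List.pyGetD row c 0)) := by
  induction rows generalizing pre0 with
  | nil => simp [pvBPre, pvPS]
  | cons row rest ih =>
    simp only [pvBPre, List.map_cons, pvPS]
    rw [PySem.List.pyGetD_neg_one pre0 0 h]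
    rw [ih (pre0 ++ [pre0.getLast h + PySem.List.pyGetD row c 0]) (by simp)]
    simp

theorem pv_take_min_length {α : Type} (l : List α) (k : Nat) :
    l.take (min k l.length) = l.take k := by
  rw [← List.take_take, List.take_length]

-- A's inner loop computes the window sum over the mapped column
theorem pvAInner_eq (T : List (List Int)) (c : Int) (m : Nat) :
    ∀ (a : Nat), a + m = 10 → ∀ (i s : Int), 0 ≤ i → i + a ≤ (T.length : Int) →
      pvAInner T c (T.length : Int) i (PySem.List.pyRange a 10 1) s
        = s + (((T.map (fun row => PySem.List.pyGetD row c 0)).drop (i.toNat + a)).take m).sum := by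
  induction m with
  | zero =>
    intro a ha i s hi hia
    have : (10 : Int) ≤ (a : Int) := by omega
    rw [PySem.List.pyRange_one_eq_nil (by exact_mod_cast this)]
    simp [pvAInner]
  | succ m ih =>
    intro a ha i s hi hia
    have hlt : (a : Int) < 10 := by omega
    rw [PySem.List.pyRange_one_cons hlt]
    simp only [pvAInner]
    by_cases hbrk : i + (a : Int) = (T.length : Int)
    · rw [if_pos hbrk]
      have hdrop : (T.map (fun row => PySem.List.pyGetD row c 0)).drop (i.toNat + a) = [] := by
        apply List.drop_eq_nil_of_le
        simp only [List.length_map]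
        omega
      rw [hdrop]; simp
    · rw [if_neg hbrk]
      have hialt : i + (a : Int) < (T.length : Int) := lt_of_le_of_ne hia hbrk
      have hidx : (i + (a : Int)).toNat < T.length := by omega
      rw [PySem.List.pyGetD_eq_getElem T ([] : List Int) (by omega) (by exact_mod_cast hialt)]
      have hr : PySem.List.pyRange ((a : Int) + 1) 10 1 = PySem.List.pyRange ((a + 1 : Nat) : Int) 10 1 := by
        push_cast; rfl
      rw [hr, ih (a + 1) (by omega) i _ hi (by push_cast; omega)]
      have hidx2 : i.toNat + a < (T.map (fun row => PySem.List.pyGetD row c 0)).length := by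
        simp only [List.length_map]; omega
      rw [List.drop_eq_getElem_cons hidx2, List.take_succ_cons, List.sum_cons]
      have hcast : (i + (a : Int)).toNat = i.toNat + a := by omega
      simp only [List.getElem_map, hcast]
      ring

theorem sum_column_spec : Claim_equal_sum_column := by
  intro T c _hDom _hPre
  unfold Spec_sum_column sum_column sum_column_alt
  simp only [PySem.List.len_eq]
  set col : List Int := T.map (fun row => PySem.List.pyGetD row c 0) with hcol
  have hpre : pvBPre c T [0] = 0 :: pvPS 0 col := by
    rw [pvBPre_eq c T [0] (by simp)]
    simp [hcol]
  rw [hpre]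
  have hlen : col.length = T.length := by simp [hcol]
  apply PySem.List.foldl_congr_mem
  intro acc i hmem
  rw [PySem.List.mem_pyRange_one] at hmem
  obtain ⟨hi0, hin⟩ := hmem
  -- A's per-start value
  have hA := pvAInner_eq T c 10 0 rfl i 0 hi0 (by push_cast; omega)
  push_cast at hA
  simp only [add_zero, zero_add] at hA
  rw [hA]
  -- B's per-start value
  have hgetD : ∀ (k : Int), 0 ≤ k → k ≤ (T.length : Int) →
      PySem.List.pyGetD (0 :: pvPS 0 col) k 0 = (col.take k.toNat).sum := by
    intro k hk0 hkn
    have hklen : k < ((0 :: pvPS 0 col).length : Int) := by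
      simp [pvPS_length, hlen]; omega
    rw [PySem.List.pyGetD_eq_getElem (0 :: pvPS 0 col) 0 hk0 (by exact_mod_cast hklen)]
    have hkle : k.toNat ≤ col.length := by omega
    have := pvPS_getD col 0 k.toNat hkle
    rw [List.getD_eq_getElem _ _ (by simp [pvPS_length]; omega)] at this
    rw [this]; ring
  rw [hgetD (min (i + 10) (T.length : Int)) (by omega) (by omega),
      hgetD i hi0 (le_of_lt hin)]
  have hmn : (min (i + 10) (T.length : Int)).toNat = i.toNat + min 10 (col.length - i.toNat) := by
    omega
  rw [hmn, List.take_add, List.sum_append]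
  have h10 : (col.drop i.toNat).take (min 10 (col.length - i.toNat)) = (col.drop i.toNat).take 10 := by
    have : col.length - i.toNat = (col.drop i.toNat).length := by simp
    rw [this, pv_take_min_length]
  rw [h10]
  -- max acc s  vs  if s > acc then s else acc
  rw [← hcol] at *
  have hs : (col.take i.toNat).sum + ((col.drop i.toNat).take 10).sum - (col.take i.toNat).sum
      = ((col.drop i.toNat).take 10).sum := by ring
  rw [hs]
  rw [max_def]
  split_ifs <;> omega
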